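-- pv_equiv track=rewrite | github.com/SkylerHill-Sky/PythonPractice | src/counting_elements/max_counters.py | max_counters
-- ===== SOURCE A (Python) =====
-- def max_counters(n, a):
--     l = [0] * n
--
--     for i in a:
--         if i == n+1:
--             l = [max(l)] * n
--             # increase all to maximum value
--         elif 1 <= i <= n:
--             l[ i-1 ] += 1
--         else:   #i > n+1
--             # this isn't clear how to handle this based on the prompt, I could handle bad input with:
--             # raise  ValueError("the prompt states this number should be between 1 and n+1 ")
--             pass
--
--     return l
-- ===== SOURCE B (Python) =====
-- def max_counters(n, a):
--     # Lazy max-counter: keep a floor (value all counters were last reset to),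
--     # the running maximum, and only the counters actually touched since, in a dict.
--     floor = 0
--     best = 0
--     cnt = {}
--     for i in a:
--         if i == n + 1:
--             floor = best
--             cnt = {}
--         elif 1 <= i <= n:
--             cur = cnt.get(i, floor) + 1
--             cnt[i] = cur
--             if cur > best:
--                 best = cur
--     return [cnt.get(i, floor) for i in range(1, n + 1)]
-- ===== Notes on version B (the rewrite author's own statement) =====
-- stated objective: alternative
-- what changed: B replaces the per-reset O(n) set-all-to-max rebuild inside the loop by lazy floor/best tracking with a dict of touched counters, materialising the counter list once at the end.
import Mathlib
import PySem

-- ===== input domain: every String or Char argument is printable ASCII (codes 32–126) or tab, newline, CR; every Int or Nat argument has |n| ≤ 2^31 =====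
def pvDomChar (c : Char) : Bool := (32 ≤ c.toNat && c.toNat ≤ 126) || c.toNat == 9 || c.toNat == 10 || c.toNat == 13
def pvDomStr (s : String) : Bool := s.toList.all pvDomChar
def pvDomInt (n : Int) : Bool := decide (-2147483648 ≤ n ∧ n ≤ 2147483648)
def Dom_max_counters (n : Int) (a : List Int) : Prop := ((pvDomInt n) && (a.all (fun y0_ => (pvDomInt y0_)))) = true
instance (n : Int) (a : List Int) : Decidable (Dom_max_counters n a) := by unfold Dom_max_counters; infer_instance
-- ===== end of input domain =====

-- B replaces A's in-loop "set all to max" rebuild by lazy floor/best tracking with a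
-- dict of touched counters, applied once at the end (an alternative algorithm).

-- ===== PORT A =====
-- loop body of A; 'max(l)' raises on empty l (only reachable outside Pre_), so '.getD 0' is never read under Pre_;
-- 'l[i-1] += 1' is always in range in its branch (1 ≤ i ≤ n = len l), so the total pyGetD/pySetD forms are exact there
def max_countersStep (n : Int) (l : List Int) (i : Int) : List Int :=
  if i = n + 1 then
    List.replicate n.toNat ((PySem.List.max? l (fun x => x)).getD 0)
  else if 1 ≤ i ∧ i ≤ n then
    PySem.List.pySetD l (i - 1) (PySem.List.pyGetD l (i - 1) 0 + 1)
  else l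

def max_counters (n : Int) (a : List Int) : List Int :=
  a.foldl (max_countersStep n) (List.replicate n.toNat 0)

-- ===== PORT B =====
-- loop body of B over the state (floor, best, cnt)
def max_countersAltStep (n : Int) (st : Int × Int × PySem.Dict Int Int) (i : Int) :
    Int × Int × PySem.Dict Int Int :=
  if i = n + 1 then (st.2.1, st.2.1, PySem.Dict.empty)
  else if 1 ≤ i ∧ i ≤ n then
    let cur := st.2.2.getD i st.1 + 1
    (st.1, if cur > st.2.1 then cur else st.2.1, st.2.2.insert i cur)
  else st

def max_counters_alt (n : Int) (a : List Int) : List Int :=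
  let st := a.foldl (max_countersAltStep n) (0, 0, PySem.Dict.empty)
  (PySem.List.pyRange 1 (n + 1) 1).map (fun i => st.2.2.getD i st.1)

-- ===== PRECONDITION & SPEC =====
-- Pre_ excludes exactly the inputs where A raises: n ≤ 0 together with n+1 in a makes A call max([]) (ValueError)
def Pre_max_counters (n : Int) (a : List Int) : Prop := ¬ (n ≤ 0 ∧ (n + 1) ∈ a)
instance (n : Int) (a : List Int) : Decidable (Pre_max_counters n a) := by
  unfold Pre_max_counters; infer_instance

def pvWitness_max_counters : Int × List Int := (3, [3, 4, 1, 4, 3])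

def Spec_max_counters (n : Int) (a : List Int) (out : List Int) : Prop := out = max_counters_alt n a
instance (n : Int) (a : List Int) (out : List Int) : Decidable (Spec_max_counters n a out) := by
  unfold Spec_max_counters; infer_instance

-- ===== CLAIM (what is proved, stated in full; the proofs are below) =====
def Claim_equal_max_counters : Prop := ∀ (n : Int) (a : List Int), Dom_max_counters n a → Pre_max_counters n a → Spec_max_counters n a (max_counters n a)



-- ===== LEMMAS AND PROOFS =====

-- the loop invariant: A's counter list is determined by B's (floor, best, cnt) state
def InvMC (n : Int) (l : List Int) (st : Int × Int × PySem.Dict Int Int) : Prop :=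
  l = (PySem.List.pyRange 1 (n + 1) 1).map (fun i => st.2.2.getD i st.1)
  ∧ PySem.List.max? l (fun x => x) = some st.2.1

-- max? with the identity key on a nonempty list is exactly "the maximum value"
theorem max?_id_eq_some_iff (l : List Int) (m : Int) (hne : l ≠ []) :
    PySem.List.max? l (fun x => x) = some m ↔ m ∈ l ∧ ∀ y ∈ l, y ≤ m := by
  constructor
  · intro h
    exact ⟨PySem.List.max?_mem h, fun y hy => PySem.List.max?_isMax h y hy⟩
  · rintro ⟨hm, hall⟩
    rcases Option.ne_none_iff_exists'.1
      (fun h0 => hne ((PySem.List.max?_eq_none_iff l (fun x : Int => x)).1 h0)) with ⟨m0, h0⟩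
    have h1 := PySem.List.max?_mem h0
    have h2 := PySem.List.max?_isMax h0
    have : m0 = m := le_antisymm (hall m0 h1) (h2 m hm)
    rw [h0, this]

-- bumping one element by 1 moves the maximum to max b (old+1)
theorem max?_set_bump (l : List Int) (k : Nat) (hk : k < l.length) (b : Int)
    (hmax : PySem.List.max? l (fun x => x) = some b) :
    PySem.List.max? (l.set k (l[k] + 1)) (fun x => x) = some (max b (l[k] + 1)) := by
  have hne : l.set k (l[k] + 1) ≠ [] :=
    List.ne_nil_of_length_pos (by simp; omega)
  rw [max?_id_eq_some_iff _ _ hne]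
  constructor
  · by_cases hbc : b ≤ l[k] + 1
    · rw [max_eq_right hbc]
      exact List.mem_iff_getElem.2 ⟨k, by simpa using hk, List.getElem_set_self _⟩
    · have hbc' : l[k] + 1 < b := lt_of_not_ge hbc
      rw [max_eq_left (le_of_lt hbc')]
      obtain ⟨j, hj, hjb⟩ := List.getElem_of_mem (PySem.List.max?_mem hmax)
      have hjk : k ≠ j := by
        intro h; subst h; omega
      exact List.mem_iff_getElem.2 ⟨j, by simpa using hj,
        (List.getElem_set_ne hjk _).trans hjb⟩
  · intro y hy
    rcases List.mem_or_eq_of_mem_set hy with hyl | hyc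
    · exact le_trans (PySem.List.max?_isMax hmax y hyl) (le_max_left _ _)
    · subst hyc; exact le_max_right _ _

-- indexing a comprehension over range(1, n+1)
theorem getElem_map_range1 (a b : Int) (g : Int → Int) (m : Nat)
    (hm : m < ((PySem.List.pyRange a b 1).map g).length) :
    ((PySem.List.pyRange a b 1).map g)[m] = g (a + m) := by
  simp [PySem.List.getElem_pyRange_one]

theorem invMC_init (n : Int) (hn : 0 < n) :
    InvMC n (List.replicate n.toNat 0) ((0 : Int), (0 : Int), PySem.Dict.empty) := by
  constructor
  · simp [PySem.Dict.getD_empty, List.map_const', PySem.List.length_pyRange_one,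
      add_sub_cancel_right]
  · rw [max?_id_eq_some_iff _ _ (by simp; omega)]
    exact ⟨List.mem_replicate.2 ⟨by omega, rfl⟩,
      fun y hy => le_of_eq (List.eq_of_mem_replicate hy)⟩

theorem invMC_step (n : Int) (hn : 0 < n) (l : List Int) (st : Int × Int × PySem.Dict Int Int)
    (h : InvMC n l st) (i : Int) :
    InvMC n (max_countersStep n l i) (max_countersAltStep n st i) := by
  obtain ⟨hmap, hmax⟩ := h
  subst hmap
  set l : List Int := (PySem.List.pyRange 1 (n + 1) 1).map (fun j => st.2.2.getD j st.1)
    with hldef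
  have hlen : l.length = n.toNat := by
    rw [hldef]; simp [PySem.List.length_pyRange_one]
  by_cases hreset : i = n + 1
  · -- reset branch
    have eA : max_countersStep n l i = List.replicate n.toNat st.2.1 := by
      rw [max_countersStep, if_pos hreset, hmax]; rfl
    have eB : max_countersAltStep n st i = (st.2.1, st.2.1, PySem.Dict.empty) := by
      rw [max_countersAltStep, if_pos hreset]
    rw [eA, eB]
    constructor
    · simp [PySem.Dict.getD_empty, List.map_const', PySem.List.length_pyRange_one,
        add_sub_cancel_right]
    · rw [max?_id_eq_some_iff _ _ (by simp; omega)]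
      exact ⟨List.mem_replicate.2 ⟨by omega, rfl⟩,
        fun y hy => le_of_eq (List.eq_of_mem_replicate hy)⟩
  · by_cases hin : 1 ≤ i ∧ i ≤ n
    · -- increment branch
      obtain ⟨hi1, hi2⟩ := hin
      have hik : i - 1 = (((i - 1).toNat : Nat) : Int) := by omega
      have hkl : (i - 1).toNat < l.length := by omega
      have harg : (1 : Int) + ((i - 1).toNat : Int) = i := by omega
      have hval : l[(i - 1).toNat] = st.2.2.getD i st.1 := by
        simp only [hldef, getElem_map_range1, harg]
      have hread : PySem.List.pyGetD l (i - 1) 0 = st.2.2.getD i st.1 := by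
        rw [hik, PySem.List.pyGetD_natCast, List.getD_eq_getElem l 0 hkl, hval]
      have eA : max_countersStep n l i = l.set (i - 1).toNat (st.2.2.getD i st.1 + 1) := by
        rw [max_countersStep, if_neg hreset, if_pos ⟨hi1, hi2⟩, hread, hik,
          PySem.List.pySetD_natCast]
        simp
      have eB : max_countersAltStep n st i =
          (st.1, if st.2.2.getD i st.1 + 1 > st.2.1 then st.2.2.getD i st.1 + 1 else st.2.1,
            st.2.2.insert i (st.2.2.getD i st.1 + 1)) := by
        rw [max_countersAltStep, if_neg hreset, if_pos ⟨hi1, hi2⟩]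
      rw [eA, eB]
      refine ⟨?_, ?_⟩
      · -- the updated list is the comprehension over the updated dict
        show l.set (i - 1).toNat (st.2.2.getD i st.1 + 1) =
          (PySem.List.pyRange 1 (n + 1) 1).map
            (fun j => (st.2.2.insert i (st.2.2.getD i st.1 + 1)).getD j st.1)
        apply List.ext_getElem
        · simp [hlen, PySem.List.length_pyRange_one]
        · intro m hm1 hm2
          simp only [hldef, List.getElem_set, getElem_map_range1, PySem.Dict.getD_insert]
          by_cases hmk : (i - 1).toNat = m
          · rw [if_pos hmk, if_pos (by omega)]
          · rw [if_neg hmk, if_neg (by omega)]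
      · -- the running maximum after the bump
        show PySem.List.max? (l.set (i - 1).toNat (st.2.2.getD i st.1 + 1)) (fun x => x) =
          some (if st.2.2.getD i st.1 + 1 > st.2.1 then st.2.2.getD i st.1 + 1 else st.2.1)
        rw [← hval, max?_set_bump l (i - 1).toNat hkl st.2.1 hmax]
        by_cases hbc : l[(i - 1).toNat] + 1 > st.2.1
        · rw [if_pos hbc, max_eq_right (by omega)]
        · rw [if_neg hbc, max_eq_left (by omega)]
    · -- pass branch
      have eA : max_countersStep n l i = l := by
        rw [max_countersStep, if_neg hreset, if_neg hin]
      have eB : max_countersAltStep n st i = st := by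
        rw [max_countersAltStep, if_neg hreset, if_neg hin]
      rw [eA, eB]
      exact ⟨hldef, hmax⟩

theorem invMC_foldl (n : Int) (hn : 0 < n) (a : List Int) (l : List Int)
    (st : Int × Int × PySem.Dict Int Int) (h : InvMC n l st) :
    InvMC n (a.foldl (max_countersStep n) l) (a.foldl (max_countersAltStep n) st) := by
  induction a generalizing l st with
  | nil => exact h
  | cons x t ih => exact ih _ _ (invMC_step n hn l st h x)

-- ===== VERDICT (by name: the statement is the Claim_ definition above) =====
theorem max_counters_spec : Claim_equal_max_counters := by
  intro n a _ hpre
  unfold Spec_max_counters max_counters max_counters_alt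
  by_cases hn : 0 < n
  · exact (invMC_foldl n hn a _ _ (invMC_init n hn)).1
  · -- n <= 0: Pre_ rules out n+1 in a, so neither loop body ever changes its state
    have hna : (n + 1) ∉ a := fun hmem => hpre ⟨by omega, hmem⟩
    have hA : a.foldl (max_countersStep n) (List.replicate n.toNat 0)
        = List.replicate n.toNat 0 := by
      rw [PySem.List.foldl_congr_mem a (max_countersStep n) (fun acc _ => acc) _
        (fun acc x hx => by
          rw [max_countersStep, if_neg (show ¬ x = n + 1 from fun h => hna (h ▸ hx)),
            if_neg (by omega)]),
        PySem.List.foldl_ignore]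
    have hB : a.foldl (max_countersAltStep n) ((0 : Int), (0 : Int), PySem.Dict.empty)
        = ((0 : Int), (0 : Int), PySem.Dict.empty) := by
      rw [PySem.List.foldl_congr_mem a (max_countersAltStep n) (fun acc _ => acc) _
        (fun acc x hx => by
          rw [max_countersAltStep, if_neg (show ¬ x = n + 1 from fun h => hna (h ▸ hx)),
            if_neg (by omega)]),
        PySem.List.foldl_ignore]
    rw [hA, hB, PySem.List.pyRange_one_eq_nil (by omega)]
    simp [show n.toNat = 0 by omega]
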